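-- pv_equiv track=rewrite | github.com/Sigmmma/refinery | refinery/repl/util.py | convert_arg_line_to_args
-- ===== SOURCE A (Python) =====
-- def convert_arg_line_to_args(arg_line):
--     arg_line = arg_line.strip()
--     args = []
--     i = 0
--     while i < len(arg_line):
--         # find the next non-whitespace character
--         while i < len(arg_line):
--             if arg_line[i] not in " \t":
--                 break
--             i += 1
--
--         if arg_line[i] == ";": break
--
--         if arg_line[i] == '"':
--             # there's a quote to start this argument. find the
--             # next quote and encapsulate everything as the arg
--             i += 1  # jump past the first "
--             arg_end_i = arg_line.find('"', i)
--         else: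
--             arg_end_i = -1
--             for char in ';" \t':
--                 char_i = arg_line.find(char, i)
--                 if arg_end_i < 0 or (char_i < arg_end_i and char_i >= 0):
--                     arg_end_i = char_i
--
--         if arg_end_i < 0: arg_end_i = len(arg_line)
--
--         args.append(arg_line[i: arg_end_i])
--         i = arg_end_i
--
--         if i < len(arg_line):
--             if arg_line[i] == ";":
--                 break
--
--             i += 1  # jump past the last "
--     return args
-- ===== SOURCE B (Python) =====
-- def convert_arg_line_to_args(arg_line):
--     # Single-pass tokenizer: walk one index with a character buffer instead of
--     # find/slice; collects each token (quoted, or plain up to a delimiter).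
--     s = arg_line.strip()
--     n = len(s)
--     args = []
--     i = 0
--     while i < n:
--         while i < n and s[i] in " \t":
--             i += 1
--         if i == n:
--             break
--         c = s[i]
--         if c == ";":
--             break
--         buf = []
--         if c == '"':
--             i += 1
--             while i < n and s[i] != '"':
--                 buf.append(s[i])
--                 i += 1
--         else:
--             while i < n and s[i] not in ' \t";':
--                 buf.append(s[i])
--                 i += 1
--         args.append("".join(buf))
--         if i < n:
--             if s[i] == ";":
--                 break
--             i += 1
--     return args
-- ===== Notes on version B (the rewrite author's own statement) =====
-- stated objective: alternative
-- what changed: Replaced the str.find-over-four-delimiters plus min-logic plus slicing tokenizer with a single-index character walk that accumulates each token in a buffer, consuming quoted runs and plain runs directly.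
import Mathlib
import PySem

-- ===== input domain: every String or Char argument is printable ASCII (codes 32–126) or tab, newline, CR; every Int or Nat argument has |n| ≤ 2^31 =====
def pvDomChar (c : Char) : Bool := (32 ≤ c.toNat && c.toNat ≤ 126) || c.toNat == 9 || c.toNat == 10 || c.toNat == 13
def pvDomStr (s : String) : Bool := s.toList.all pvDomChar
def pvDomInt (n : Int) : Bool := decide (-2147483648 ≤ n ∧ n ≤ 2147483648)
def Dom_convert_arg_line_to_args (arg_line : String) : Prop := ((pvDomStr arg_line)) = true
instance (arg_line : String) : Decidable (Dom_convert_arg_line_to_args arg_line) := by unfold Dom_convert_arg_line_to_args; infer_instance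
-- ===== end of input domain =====

-- B replaces A's find-the-next-delimiter-and-slice tokenizer by a single
-- character-at-a-time walk with a token buffer (objective: alternative, same cost).

-- ===== PORT A =====
-- inner `while` skipping spaces/tabs

def aSkip (cs : List Char) (i : Nat) : Nat :=
  if h : i < cs.length then
    if cs[i] = ' ' ∨ cs[i] = '\t' then aSkip cs (i + 1) else i
  else i
termination_by cs.length - i

-- i ≤ aSkip cs i (cited by aLoop's decreasing_by)

theorem aSkip_ge (cs : List Char) (i : Nat) : i ≤ aSkip cs i := by
  unfold aSkip
  split
  · split
    · have := aSkip_ge cs (i + 1); omega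
    · exact le_refl i
  · exact le_refl i
termination_by cs.length - i

-- str.find returns -1 or an index ≥ start (cited by aLoop's decreasing_by)

theorem findFrom_lb (cs : List Char) (sub : List Char) (k : Nat) (hk : k ≤ cs.length) :
    PySem.Chars.findFrom cs sub (k : Int) none = -1 ∨
      (k : Int) ≤ PySem.Chars.findFrom cs sub (k : Int) none := by
  rw [PySem.Chars.findFrom_natCast cs sub k hk]
  split
  · exact Or.inl rfl
  · rename_i h
    right
    have h2 : PySem.Chars.find (cs.drop k) sub ≠ -1 := h
    have h3 : sub <:+: cs.drop k := (PySem.Chars.find_ne_neg_one_iff _ _).mp h2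
    have h4 : 0 ≤ PySem.Chars.find (cs.drop k) sub := (PySem.Chars.find_nonneg_iff _ _).mpr h3
    omega

-- the `for char in ';" \t'` minimum-of-finds loop

def aFindMin (cs : List Char) (i : Nat) : Int :=
  List.foldl (fun argEnd ch =>
      let charI := PySem.Chars.findFrom cs [ch] (i : Int) none
      if argEnd < 0 ∨ (charI < argEnd ∧ charI ≥ 0) then charI else argEnd)
    (-1) [';', '"', ' ', '\t']

theorem foldMin_lb (cs : List Char) (j : Nat) (hj : j ≤ cs.length) :
    ∀ (L : List Char) (acc : Int), (acc = -1 ∨ (j : Int) ≤ acc) →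
      (List.foldl (fun argEnd ch =>
          let charI := PySem.Chars.findFrom cs [ch] (j : Int) none
          if argEnd < 0 ∨ (charI < argEnd ∧ charI ≥ 0) then charI else argEnd) acc L) = -1 ∨
        (j : Int) ≤ List.foldl (fun argEnd ch =>
          let charI := PySem.Chars.findFrom cs [ch] (j : Int) none
          if argEnd < 0 ∨ (charI < argEnd ∧ charI ≥ 0) then charI else argEnd) acc L := by
  intro L
  induction L with
  | nil => intro acc hacc; simpa using hacc
  | cons ch L ih =>
    intro acc hacc
    simp only [List.foldl]
    apply ih
    by_cases hc : acc < 0 ∨ (PySem.Chars.findFrom cs [ch] (j : Int) none < acc ∧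
        PySem.Chars.findFrom cs [ch] (j : Int) none ≥ 0)
    · simp only [if_pos hc]
      exact findFrom_lb cs [ch] j hj
    · simp only [if_neg hc]
      exact hacc

theorem aFindMin_lb (cs : List Char) (j : Nat) (hj : j ≤ cs.length) :
    aFindMin cs j = -1 ∨ (j : Int) ≤ aFindMin cs j :=
  foldMin_lb cs j hj [';', '"', ' ', '\t'] (-1) (Or.inl rfl)

-- termination lemmas cited by aLoop's decreasing_by
theorem aLoop_dec_quote (cs : List Char) (i : Nat) (c : Char)
    (hi : i < cs.length)
    (hj : PySem.List.pyGet? cs ((aSkip cs i : Nat) : Int) = some c)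
    (h2 : (if PySem.Chars.findFrom cs ['"'] ((aSkip cs i : Nat) + 1 : Nat) none < 0
        then (cs.length : Int)
        else PySem.Chars.findFrom cs ['"'] ((aSkip cs i : Nat) + 1 : Nat) none).toNat < cs.length) :
    cs.length - ((if PySem.Chars.findFrom cs ['"'] ((aSkip cs i : Nat) + 1 : Nat) none < 0
        then (cs.length : Int)
        else PySem.Chars.findFrom cs ['"'] ((aSkip cs i : Nat) + 1 : Nat) none).toNat + 1) < cs.length - i := by
  have hge := aSkip_ge cs i
  have hjlt : aSkip cs i < cs.length := by
    simp only [PySem.List.pyGet?_natCast] at hj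
    exact (List.getElem?_eq_some_iff.mp hj).1
  have hlb := findFrom_lb cs ['"'] (aSkip cs i + 1) (by omega)
  split at h2 <;> split <;> omega

theorem aLoop_dec_plain (cs : List Char) (i : Nat) (c : Char)
    (hi : i < cs.length)
    (hj : PySem.List.pyGet? cs ((aSkip cs i : Nat) : Int) = some c)
    (h2 : (if aFindMin cs (aSkip cs i) < 0 then (cs.length : Int)
        else aFindMin cs (aSkip cs i)).toNat < cs.length) :
    cs.length - ((if aFindMin cs (aSkip cs i) < 0 then (cs.length : Int)
        else aFindMin cs (aSkip cs i)).toNat + 1) < cs.length - i := by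
  have hge := aSkip_ge cs i
  have hjlt : aSkip cs i < cs.length := by
    simp only [PySem.List.pyGet?_natCast] at hj
    exact (List.getElem?_eq_some_iff.mp hj).1
  have hlb := aFindMin_lb cs (aSkip cs i) (by omega)
  split at h2 <;> split <;> omega

-- the outer `while i < len(arg_line)` loop; `args.append` is the accumulator

def aLoop (cs : List Char) (i : Nat) (args : List String) : List String :=
  if hi : i < cs.length then
    match hj : PySem.List.pyGet? cs ((aSkip cs i : Nat) : Int) with
    | none => args
    | some c =>
      if c = ';' then args
      else if c = '"' then
        let argEnd0 := PySem.Chars.findFrom cs ['"'] ((aSkip cs i : Nat) + 1 : Nat) none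
        let argEnd : Int := if argEnd0 < 0 then (cs.length : Int) else argEnd0
        let args2 := args ++ [String.ofList (PySem.List.slice cs (some ((aSkip cs i : Nat) + 1 : Nat)) (some argEnd))]
        if h2 : argEnd.toNat < cs.length then
          if cs[argEnd.toNat] = ';' then args2
          else aLoop cs (argEnd.toNat + 1) args2
        else args2
      else
        let argEnd0 := aFindMin cs (aSkip cs i)
        let argEnd : Int := if argEnd0 < 0 then (cs.length : Int) else argEnd0
        let args2 := args ++ [String.ofList (PySem.List.slice cs (some ((aSkip cs i : Nat) : Int)) (some argEnd))]
        if h2 : argEnd.toNat < cs.length then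
          if cs[argEnd.toNat] = ';' then args2
          else aLoop cs (argEnd.toNat + 1) args2
        else args2
  else args
termination_by cs.length - i
decreasing_by
  · exact aLoop_dec_quote cs i c hi hj h2
  · exact aLoop_dec_plain cs i c hi hj h2

def convert_arg_line_to_args (arg_line : String) : List String :=
  aLoop (PySem.Str.strip arg_line).toList 0 []


-- ===== PORT B =====
-- `while i < n and s[i] in " \t"` skip loop, on the remaining characters

def bSkip : List Char → List Char
  | [] => []
  | c :: rest => if c = ' ' ∨ c = '\t' then bSkip rest else c :: rest

theorem bSkip_length_le (l : List Char) : (bSkip l).length ≤ l.length := by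
  induction l with
  | nil => simp [bSkip]
  | cons c rest ih => simp only [bSkip]; split <;> simp <;> omega

-- quoted-token loop: buffer of chars up to the closing quote, plus the rest

def bQuoted : List Char → List Char × List Char
  | [] => ([], [])
  | c :: rest =>
    if c = '"' then ([], c :: rest)
    else ((bQuoted rest).1.cons c |> fun b => (b, (bQuoted rest).2))

theorem bQuoted_snd_length_le (l : List Char) : (bQuoted l).2.length ≤ l.length := by
  induction l with
  | nil => simp [bQuoted]
  | cons c rest ih => simp only [bQuoted]; split <;> simp <;> omega

-- plain-token loop: buffer of chars up to a delimiter, plus the rest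

def bPlain : List Char → List Char × List Char
  | [] => ([], [])
  | c :: rest =>
    if c = ' ' ∨ c = '\t' ∨ c = '"' ∨ c = ';' then ([], c :: rest)
    else ((bPlain rest).1.cons c |> fun b => (b, (bPlain rest).2))

theorem bPlain_snd_length_le (l : List Char) : (bPlain l).2.length ≤ l.length := by
  induction l with
  | nil => simp [bPlain]
  | cons c rest ih => simp only [bPlain]; split <;> simp <;> omega

-- termination lemmas cited by bLoop's decreasing_by
theorem bLoop_dec_quoted (l : List Char) (c : Char) (rest : List Char) (c2 : Char) (r2 : List Char)
    (h : bSkip l = c :: rest) (h2 : (bQuoted rest).2 = c2 :: r2) : r2.length < l.length := by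
  have ha := bSkip_length_le l
  have hb := bQuoted_snd_length_le rest
  have hc := congrArg List.length h
  have hd := congrArg List.length h2
  simp at hc hd
  omega

theorem bLoop_dec_plain (l : List Char) (c : Char) (rest : List Char) (c2 : Char) (r2 : List Char)
    (h : bSkip l = c :: rest) (h2 : (bPlain (c :: rest)).2 = c2 :: r2) : r2.length < l.length := by
  have ha := bSkip_length_le l
  have hb := bPlain_snd_length_le (c :: rest)
  have hc := congrArg List.length h
  have hd := congrArg List.length h2
  simp at hb hc hd
  omega

-- the outer while loop of B; each appended token becomes a cons

def bLoop (l : List Char) : List String :=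
  match h : bSkip l with
  | [] => []
  | c :: rest =>
    if c = ';' then []
    else if c = '"' then
      String.ofList (bQuoted rest).1 ::
        (match h2 : (bQuoted rest).2 with
         | [] => []
         | c2 :: r2 => if c2 = ';' then [] else bLoop r2)
    else
      String.ofList (bPlain (c :: rest)).1 ::
        (match h2 : (bPlain (c :: rest)).2 with
         | [] => []
         | c2 :: r2 => if c2 = ';' then [] else bLoop r2)
termination_by l.length
decreasing_by
  · exact bLoop_dec_quoted l c rest c2 r2 h h2
  · exact bLoop_dec_plain l c rest c2 r2 h h2

def convert_arg_line_to_args_alt (arg_line : String) : List String :=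
  bLoop (PySem.Str.strip arg_line).toList


-- ===== PRECONDITION & SPEC =====

def Spec_convert_arg_line_to_args (arg_line : String) (out : List String) : Prop := out = convert_arg_line_to_args_alt arg_line
instance (arg_line : String) (out : List String) : Decidable (Spec_convert_arg_line_to_args arg_line out) := by unfold Spec_convert_arg_line_to_args; infer_instance


-- ===== CLAIM =====

def Claim_equal_convert_arg_line_to_args : Prop := ∀ (arg_line : String), Dom_convert_arg_line_to_args arg_line → Spec_convert_arg_line_to_args arg_line (convert_arg_line_to_args arg_line)


-- ===== LEMMAS AND PROOFS =====

theorem drop_aSkip (cs : List Char) (i : Nat) :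
    cs.drop (aSkip cs i) = bSkip (cs.drop i) := by
  rw [aSkip]
  split
  · rename_i h
    rw [List.drop_eq_getElem_cons h, bSkip]
    split
    · exact drop_aSkip cs (i + 1)
    · rw [← List.drop_eq_getElem_cons h]
  · rename_i h
    rw [List.drop_eq_nil_of_le (by omega), bSkip]
termination_by cs.length - i

theorem singleton_prefix_iff (c : Char) (l : List Char) :
    [c] <+: l ↔ l.head? = some c := by
  cases l with
  | nil => simp
  | cons a t => simp [List.cons_prefix_iff]

theorem findCharRaw (cs : List Char) (c : Char) (s : Nat) (hs : s ≤ cs.length) :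
    (PySem.Chars.findFrom cs [c] (s : Int) none = -1 ∧
      ∀ i, (hi : i < cs.length) → s ≤ i → cs[i] ≠ c) ∨
    (0 ≤ PySem.Chars.findFrom cs [c] (s : Int) none ∧
      (s : Int) ≤ PySem.Chars.findFrom cs [c] (s : Int) none ∧
      PySem.Chars.findFrom cs [c] (s : Int) none < cs.length ∧
      (∀ hlt : (PySem.Chars.findFrom cs [c] (s : Int) none).toNat < cs.length,
        cs[(PySem.Chars.findFrom cs [c] (s : Int) none).toNat] = c) ∧
      ∀ i, (hi : i < cs.length) → s ≤ i →
        i < (PySem.Chars.findFrom cs [c] (s : Int) none).toNat → cs[i] ≠ c) := by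
  rw [PySem.Chars.findFrom_natCast cs [c] s hs]
  by_cases hfound : PySem.Chars.find (cs.drop s) [c] = -1
  · left
    refine ⟨by simp [hfound], ?_⟩
    have hninf : ¬ [c] <:+: cs.drop s := (PySem.Chars.find_eq_neg_one_iff _ _).mp hfound
    intro i hi hsi hcontra
    apply hninf
    have hmem : c ∈ cs.drop s := by
      have hq : (cs.drop s)[i - s]? = some c := by
        rw [List.getElem?_drop, show s + (i - s) = i from by omega,
          List.getElem?_eq_getElem hi, hcontra]
      exact List.mem_of_getElem? hq
    obtain ⟨l1, l2, hl⟩ := List.append_of_mem hmem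
    exact ⟨l1, l2, by simp [hl]⟩
  · right
    rw [if_neg hfound]
    have hinf : [c] <:+: cs.drop s := (PySem.Chars.find_ne_neg_one_iff _ _).mp hfound
    have hnn : 0 ≤ PySem.Chars.find (cs.drop s) [c] :=
      (PySem.Chars.find_nonneg_iff _ _).mpr hinf
    obtain ⟨hpre, hleast⟩ := PySem.Chars.find_spec (s := cs.drop s) (sub := [c]) hnn
    set f : Int := PySem.Chars.find (cs.drop s) [c] with hf
    have hhead : ((cs.drop s).drop f.toNat).head? = some c :=
      (singleton_prefix_iff _ _).mp hpre
    rw [List.head?_drop] at hhead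
    have hgets : (cs.drop s)[f.toNat]? = some c := by
      simpa using hhead
    have hflt : f.toNat < (cs.drop s).length := (List.getElem?_eq_some_iff.mp hgets).1
    have hlen : (cs.drop s).length = cs.length - s := by simp
    refine ⟨by omega, by omega, by omega, ?_, ?_⟩
    · intro hlt
      have hq : cs[s + f.toNat]? = some c := by
        rw [← List.getElem?_drop]; exact hgets
      have hq2 : cs[((s : Int) + f).toNat]? = some c := by
        rw [show ((s : Int) + f).toNat = s + f.toNat from by omega]; exact hq
      obtain ⟨_, h2⟩ := List.getElem?_eq_some_iff.mp hq2
      exact h2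
    · intro i hi hsi hilt hcontra
      have hidx : i - s < f.toNat := by omega
      have := hleast (i - s) hidx
      apply this
      rw [singleton_prefix_iff, List.head?_drop, List.getElem?_drop]
      have : s + (i - s) = i := by omega
      rw [this, List.getElem?_eq_getElem hi, hcontra]

def MinInv (cs : List Char) (j : Nat) (L : List Char) (acc : Int) : Prop :=
  (acc = -1 ∧ ∀ i, (hi : i < cs.length) → j ≤ i → cs[i] ∉ L) ∨
  (0 ≤ acc ∧ (j : Int) ≤ acc ∧
    ∃ h : acc.toNat < cs.length, cs[acc.toNat] ∈ L ∧
      ∀ i, (hi : i < cs.length) → j ≤ i → i < acc.toNat → cs[i] ∉ L)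

theorem minStep (cs : List Char) (j : Nat) (L : List Char) (acc : Int) (ch : Char)
    (hs : j ≤ cs.length) (hP : MinInv cs j L acc) :
    MinInv cs j (ch :: L)
      (if acc < 0 ∨ (PySem.Chars.findFrom cs [ch] (j : Int) none < acc ∧
          PySem.Chars.findFrom cs [ch] (j : Int) none ≥ 0)
        then PySem.Chars.findFrom cs [ch] (j : Int) none else acc) := by
  have raw := findCharRaw cs ch j hs
  set F : Int := PySem.Chars.findFrom cs [ch] (j : Int) none with hF
  rcases hP with ⟨hacc, hnone⟩ | ⟨h0, hj0, hlt, hmem, hleast⟩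
  · rw [if_pos (Or.inl (by omega))]
    rcases raw with ⟨hFm, hnoc⟩ | ⟨hF0, hFj, hFlt, hFat, hFleast⟩
    · left
      refine ⟨hFm, fun i hi hji => ?_⟩
      simp only [List.mem_cons, not_or]
      exact ⟨hnoc i hi hji, hnone i hi hji⟩
    · right
      refine ⟨hF0, hFj, by omega, ?_, fun i hi hji hiF => ?_⟩
      · simp [hFat (by omega)]
      · simp only [List.mem_cons, not_or]
        exact ⟨hFleast i hi hji hiF, hnone i hi hji⟩
  · by_cases hcond : acc < 0 ∨ (F < acc ∧ F ≥ 0)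
    · rw [if_pos hcond]
      have hFa : F < acc ∧ 0 ≤ F := by
        rcases hcond with h | ⟨h1, h2⟩
        · omega
        · exact ⟨h1, h2⟩
      rcases raw with ⟨hFm, _⟩ | ⟨hF0, hFj, hFlt, hFat, hFleast⟩
      · omega
      · right
        refine ⟨hF0, hFj, by omega, by simp [hFat (by omega)], fun i hi hji hiF => ?_⟩
        simp only [List.mem_cons, not_or]
        exact ⟨hFleast i hi hji hiF, hleast i hi hji (by omega)⟩
    · rw [if_neg hcond]
      right
      refine ⟨h0, hj0, hlt, by simp [hmem], fun i hi hji hia => ?_⟩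
      simp only [List.mem_cons, not_or]
      refine ⟨?_, hleast i hi hji hia⟩
      rcases raw with ⟨_, hnoc⟩ | ⟨hF0, hFj, hFlt, hFat, hFleast⟩
      · exact hnoc i hi hji
      · exact hFleast i hi hji (by omega)

theorem aFindMin_inv (cs : List Char) (j : Nat) (hj : j ≤ cs.length) :
    MinInv cs j ['\t', ' ', '"', ';'] (aFindMin cs j) := by
  have base : MinInv cs j [] (-1) := Or.inl ⟨rfl, by simp⟩
  have s1 := minStep cs j [] (-1) ';' hj base
  have s2 := minStep cs j [';'] _ '"' hj s1
  have s3 := minStep cs j ['"', ';'] _ ' ' hj s2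
  have s4 := minStep cs j [' ', '"', ';'] _ '\t' hj s3
  simpa only [aFindMin, List.foldl] using s4

theorem takeWhile_dropWhile_split (p : Char → Bool) :
    ∀ (t : List Char) (k : Nat), k ≤ t.length →
      (∀ i, (hi : i < t.length) → i < k → p t[i] = true) →
      (∀ h : k < t.length, p t[k] = false) →
      t.takeWhile p = t.take k ∧ t.dropWhile p = t.drop k := by
  intro t
  induction t with
  | nil => intro k hk _ _; simp at hk; simp [hk]
  | cons a rest ih =>
    intro k hk hin hout
    cases k with
    | zero =>
      have := hout (by simp)
      simp at this
      simp [List.takeWhile_cons, List.dropWhile_cons, this]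
    | succ k' =>
      have ha : p a = true := hin 0 (by simp) (by omega)
      simp only [List.takeWhile_cons, List.dropWhile_cons, ha, if_true, List.take_succ_cons,
        List.drop_succ_cons]
      have := ih k' (by simpa using hk)
        (fun i hi hik => by simpa using hin (i + 1) (by simpa using hi) (by omega))
        (fun h => by simpa using hout (by simpa using h))
      exact ⟨by rw [this.1], this.2⟩

theorem bQuoted_eq (l : List Char) :
    bQuoted l = (l.takeWhile (· != '"'), l.dropWhile (· != '"')) := by
  induction l with
  | nil => simp [bQuoted]
  | cons c rest ih =>
    simp only [bQuoted, List.takeWhile_cons, List.dropWhile_cons]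
    by_cases hc : c = '"'
    · simp [hc]
    · simp [hc, ih]

theorem bPlain_eq (l : List Char) :
    bPlain l = (l.takeWhile (fun c => !(c == ' ' || c == '\t' || c == '"' || c == ';')),
                l.dropWhile (fun c => !(c == ' ' || c == '\t' || c == '"' || c == ';'))) := by
  induction l with
  | nil => simp [bPlain]
  | cons c rest ih =>
    simp only [bPlain, List.takeWhile_cons, List.dropWhile_cons]
    by_cases hc : c = ' ' ∨ c = '\t' ∨ c = '"' ∨ c = ';'
    · rcases hc with h | h | h | h <;> simp [h]
    · push_neg at hc
      obtain ⟨h1, h2, h3, h4⟩ := hc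
      simp [h1, h2, h3, h4, ih]

def bTail (r : List Char) : List String :=
  match r with
  | [] => []
  | c2 :: r2 => if c2 = ';' then [] else bLoop r2

theorem bLoop_nil (l : List Char) (h : bSkip l = []) : bLoop l = [] := by
  rw [bLoop]
  split
  · rfl
  · rename_i c rest heq; rw [h] at heq; exact absurd heq (by simp)

theorem bLoop_cons (l : List Char) (c : Char) (rest : List Char) (h : bSkip l = c :: rest) :
    bLoop l = if c = ';' then [] else if c = '"' then
        String.ofList (bQuoted rest).1 :: bTail (bQuoted rest).2
      else
        String.ofList (bPlain (c :: rest)).1 :: bTail (bPlain (c :: rest)).2 := by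
  rw [bLoop]
  split
  · rename_i heq; rw [h] at heq; exact absurd heq (by simp)
  · rename_i c' rest' heq
    rw [h] at heq
    obtain ⟨hc, hr⟩ := List.cons.injEq .. |>.mp heq
    subst hc; subst hr
    by_cases hc : c = ';'
    · simp [hc]
    · rw [if_neg hc, if_neg hc]
      by_cases hq : c = '"'
      · rw [if_pos hq, if_pos hq]
        congr 1
        unfold bTail
        split <;> rename_i h2 <;> rw [h2]
      · rw [if_neg hq, if_neg hq]
        congr 1
        unfold bTail
        split <;> rename_i h2 <;> rw [h2]

theorem token_continue (cs : List Char) (k : Nat)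
    (ih : ∀ (i : Nat) (args : List String), cs.length - i ≤ k → aLoop cs i args = args ++ bLoop (cs.drop i))
    (i : Nat) (args : List String) (E : Nat) (tok : String)
    (hi : i < cs.length) (hiE : i ≤ E) (hk : cs.length - i ≤ k + 1) :
    (if h2 : E < cs.length then
       if cs[E] = ';' then args ++ [tok] else aLoop cs (E + 1) (args ++ [tok])
     else args ++ [tok]) =
    args ++ tok :: bTail (cs.drop E) := by
  by_cases h2 : E < cs.length
  · rw [dif_pos h2, List.drop_eq_getElem_cons h2]
    by_cases hsemi : cs[E] = ';'
    · rw [if_pos hsemi]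
      simp [bTail, hsemi]
    · rw [if_neg hsemi]
      simp only [bTail, if_neg hsemi]
      rw [ih (E + 1) (args ++ [tok]) (by omega)]
      simp
  · rw [dif_neg h2, List.drop_eq_nil_of_le (by omega)]
    simp [bTail]

theorem main_loop (cs : List Char) : ∀ (k i : Nat) (args : List String),
    cs.length - i ≤ k → aLoop cs i args = args ++ bLoop (cs.drop i) := by
  intro k
  induction k with
  | zero =>
    intro i args hk
    rw [aLoop, dif_neg (by omega), List.drop_eq_nil_of_le (by omega), bLoop]
    simp [bSkip]
  | succ k ih =>
    intro i args hk
    by_cases hi : i < cs.length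
    · rw [aLoop, dif_pos hi]
      have hskip := drop_aSkip cs i
      split
      · -- pyGet? = none : skipped to end of string
        rename_i hj
        simp only [PySem.List.pyGet?_natCast] at hj
        have hge : cs.length ≤ aSkip cs i := List.getElem?_eq_none_iff.mp hj
        have hbs : bSkip (cs.drop i) = [] := by
          rw [← hskip, List.drop_eq_nil_of_le (by omega)]
        rw [bLoop_nil _ hbs]
        simp
      · rename_i c hj
        simp only [PySem.List.pyGet?_natCast] at hj
        obtain ⟨hjlt, hjc⟩ := List.getElem?_eq_some_iff.mp hj
        have hdropj : cs.drop (aSkip cs i) = c :: cs.drop (aSkip cs i + 1) := by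
          rw [List.drop_eq_getElem_cons hjlt, hjc]
        have hbs : bSkip (cs.drop i) = c :: cs.drop (aSkip cs i + 1) := by
          rw [← hskip, hdropj]
        rw [bLoop_cons _ _ _ hbs]
        by_cases hc : c = ';'
        · simp [hc]
        · rw [if_neg hc, if_neg hc]
          by_cases hq : c = '"'
          · rw [if_pos hq, if_pos hq]
            simp only []
            have raw := findCharRaw cs '"' (aSkip cs i + 1) (by omega)
            set F := PySem.Chars.findFrom cs ['"'] ((aSkip cs i + 1 : Nat) : Int) none with hF
            set E := (if F < 0 then (cs.length : Int) else F).toNat with hE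
            have hcast : (if F < 0 then (cs.length : Int) else F) = (E : Int) := by
              rw [hE]; rcases raw with ⟨h1, _⟩ | ⟨h1, _, _, _, _⟩ <;> split <;> omega
            have hE1 : aSkip cs i + 1 ≤ E := by
              rw [hE]; rcases raw with ⟨h1, _⟩ | ⟨h1, h2, _, _, _⟩ <;> split <;> omega
            have hE2 : E ≤ cs.length := by
              rw [hE]; rcases raw with ⟨h1, _⟩ | ⟨h1, _, h3, _, _⟩ <;> split <;> omega
            have hmid : ∀ i', (hi' : i' < cs.length) → aSkip cs i + 1 ≤ i' → i' < E → cs[i'] ≠ '"' := by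
              rcases raw with ⟨h1, hno⟩ | ⟨h1, _, _, _, hle⟩
              · intro i' hi' hge _; exact hno i' hi' hge
              · intro i' hi' hge hlt
                refine hle i' hi' hge ?_
                rw [hE, if_neg (by omega)] at hlt; exact hlt
            have hat : ∀ h : E < cs.length, cs[E] = '"' := by
              rcases raw with ⟨h1, hno⟩ | ⟨h1, _, _, hatF, _⟩
              · intro h; rw [hE, if_pos (by omega)] at h; simp at h
              · intro h
                have hEF : E = F.toNat := by rw [hE, if_neg (by omega)]
                have h2 := hatF (show F.toNat < cs.length by omega)
                simpa [hEF] using h2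
            have hklen : E - (aSkip cs i + 1) ≤ (cs.drop (aSkip cs i + 1)).length := by
              simp [List.length_drop]; omega
            have hsplit := takeWhile_dropWhile_split (· != '"') (cs.drop (aSkip cs i + 1))
              (E - (aSkip cs i + 1)) hklen
              (by
                intro i2 hi2 hlt
                rw [List.getElem_drop]
                simp only [bne_iff_ne, ne_eq]
                exact hmid (aSkip cs i + 1 + i2) (by simp at hi2; omega) (by omega) (by omega))
              (by
                intro h
                rw [List.getElem_drop]
                have : aSkip cs i + 1 + (E - (aSkip cs i + 1)) = E := by omega
                simp only [this]
                have hElt : E < cs.length := by simp at h; omega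
                simp [hat hElt])
            have hdropE : (bQuoted (cs.drop (aSkip cs i + 1))).2 = cs.drop E := by
              rw [bQuoted_eq]
              simp only []
              rw [hsplit.2, List.drop_drop]
              congr 1
              omega
            have htok : (bQuoted (cs.drop (aSkip cs i + 1))).1 =
                PySem.List.slice cs (some ((aSkip cs i + 1 : Nat) : Int)) (some (if F < 0 then (cs.length : Int) else F)) := by
              rw [bQuoted_eq]
              simp only []
              rw [hsplit.1, hcast, PySem.List.slice_natCast]
            rw [hdropE, htok, hcast]
            exact token_continue cs k ih i args E _ hi (by have := aSkip_ge cs i; omega) hk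
          · rw [if_neg hq, if_neg hq]
            simp only []
            rw [show (c :: List.drop (aSkip cs i + 1) cs) = List.drop (aSkip cs i) cs from hdropj.symm]
            have inv := aFindMin_inv cs (aSkip cs i) (by omega)
            set F := aFindMin cs (aSkip cs i) with hF
            set E := (if F < 0 then (cs.length : Int) else F).toNat with hE
            have hcast : (if F < 0 then (cs.length : Int) else F) = (E : Int) := by
              rw [hE]; rcases inv with ⟨h1, _⟩ | ⟨h1, _, _, _, _⟩ <;> split <;> omega
            have hE1 : aSkip cs i ≤ E := by
              rw [hE]; rcases inv with ⟨h1, _⟩ | ⟨h1, h2, _, _, _⟩ <;> split <;> omega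
            have hE2 : E ≤ cs.length := by
              rw [hE]; rcases inv with ⟨h1, _⟩ | ⟨h1, _, h3, _, _⟩ <;> split <;> omega
            have hmid : ∀ i', (hi' : i' < cs.length) → aSkip cs i ≤ i' → i' < E →
                cs[i'] ∉ (['\t', ' ', '"', ';'] : List Char) := by
              rcases inv with ⟨h1, hno⟩ | ⟨h1, _, hltF, _, hle⟩
              · intro i' hi' hge _; exact hno i' hi' hge
              · intro i' hi' hge hlt
                refine hle i' hi' hge ?_
                rw [hE, if_neg (by omega)] at hlt; exact hlt
            have hat : ∀ h : E < cs.length, cs[E] ∈ (['\t', ' ', '"', ';'] : List Char) := by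
              rcases inv with ⟨h1, hno⟩ | ⟨h1, _, hltF, hmem, _⟩
              · intro h; rw [hE, if_pos (by omega)] at h; simp at h
              · intro h
                have hEF : E = F.toNat := by rw [hE, if_neg (by omega)]
                simpa [hEF] using hmem
            have hklen : E - aSkip cs i ≤ (cs.drop (aSkip cs i)).length := by
              simp [List.length_drop]; omega
            have hsplit := takeWhile_dropWhile_split
              (fun x => !(x == ' ' || x == '\t' || x == '"' || x == ';')) (cs.drop (aSkip cs i))
              (E - aSkip cs i) hklen
              (by
                intro i2 hi2 hlt2
                rw [List.getElem_drop]
                have hm := hmid (aSkip cs i + i2) (by simp at hi2; omega) (by omega) (by omega)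
                simp at hm ⊢
                tauto)
              (by
                intro h
                rw [List.getElem_drop]
                have heq : aSkip cs i + (E - aSkip cs i) = E := by omega
                simp only [heq]
                have hElt : E < cs.length := by simp at h; omega
                have hm := hat hElt
                simp at hm ⊢
                tauto)
            have hdropE : (bPlain (cs.drop (aSkip cs i))).2 = cs.drop E := by
              rw [bPlain_eq]
              simp only []
              rw [hsplit.2, List.drop_drop]
              congr 1
              omega
            have htok : (bPlain (cs.drop (aSkip cs i))).1 =
                PySem.List.slice cs (some ((aSkip cs i : Nat) : Int)) (some (if F < 0 then (cs.length : Int) else F)) := by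
              rw [bPlain_eq]
              simp only []
              rw [hsplit.1, hcast, PySem.List.slice_natCast]
            rw [hdropE, htok]
            exact token_continue cs k ih i args E _ hi (by have := aSkip_ge cs i; omega) hk
    · rw [aLoop, dif_neg hi, List.drop_eq_nil_of_le (by omega), bLoop]
      simp [bSkip]


-- ===== VERDICT =====

theorem convert_arg_line_to_args_spec : Claim_equal_convert_arg_line_to_args := by
  intro arg_line _
  unfold Spec_convert_arg_line_to_args convert_arg_line_to_args convert_arg_line_to_args_alt
  have h := main_loop (PySem.Str.strip arg_line).toList
    (PySem.Str.strip arg_line).toList.length 0 [] (by omega)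
  simpa using h
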